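-- pv_equiv track=rewrite | github.com/RA1NCS/Hackathons | 2023/DragonHacks/fetchIngredient.py | removeOthers
-- ===== SOURCE A (Python) =====
-- def removeOthers(ingredientList):
--     otherList = (
--         "!",
--         '"',
--         "#",
--         "$",
--         "%",
--         "&",
--         "'",
--         "(",
--         ")",
--         "*",
--         "+",
--         ",",
--         ".",
--         ":",
--         ";",
--         "<",
--         "=",
--         ">",
--         "?",
--         "@",
--         "[",
--         "\\",
--         "]",
--         "^",
--         "_",
--         "`",
--         "{",
--         "|",
--         "}",
--         "~",
--         " basic",
--         " recipe follows",
--         " see recipe",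
--         " refer to recipe",
--         " as needed",
--         " to taste",
--         " optional",
--         " garnish",
--         " for serving",
--     )
--     remainderList = []
--     finalList = []
--
--     for ingredient in ingredientList:
--         joinedSentence = " ".join(ingredient)
--         remainderList.append(joinedSentence.lower())
--
--     for ingredient in remainderList:
--         for other in otherList:
--             if other in ingredient:
--                 ingredient = ingredient.replace(other, "")
--         finalList.append(ingredient)
--     return finalList
-- ===== SOURCE B (Python) =====
-- _PUNCT = set("!\"#$%&'()*+,.:;<=>?@[\\]^_`{|}~")
-- _PHRASES = (
--     " basic",
--     " recipe follows",
--     " see recipe",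
--     " refer to recipe",
--     " as needed",
--     " to taste",
--     " optional",
--     " garnish",
--     " for serving",
-- )
--
--
-- def _strip(s, phrase):
--     # hand-written left-to-right scan: skip each occurrence of phrase, keep other chars
--     out = []
--     i = 0
--     n = len(phrase)
--     while i < len(s):
--         if s.startswith(phrase, i):
--             i += n
--         else:
--             out.append(s[i])
--             i += 1
--     return "".join(out)
--
--
-- def _clean(ingredient):
--     s = "".join(ch for ch in " ".join(ingredient).lower() if ch not in _PUNCT)
--     for phrase in _PHRASES:
--         s = _strip(s, phrase)
--     return s
--
--
-- def removeOthers(ingredientList):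
--     return [_clean(ingredient) for ingredient in ingredientList]
-- ===== Notes on version B (the rewrite author's own statement) =====
-- stated objective: alternative
-- what changed: Instead of 39 guarded library .replace passes over a staged remainderList, B deletes all 30 punctuation characters in one set-membership filter pass and removes each of the 9 phrases with a hand-written single-scan cursor (_strip) that skips matches explicitly; the whole result is one comprehension per ingredient with no intermediate list.
import Mathlib
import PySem

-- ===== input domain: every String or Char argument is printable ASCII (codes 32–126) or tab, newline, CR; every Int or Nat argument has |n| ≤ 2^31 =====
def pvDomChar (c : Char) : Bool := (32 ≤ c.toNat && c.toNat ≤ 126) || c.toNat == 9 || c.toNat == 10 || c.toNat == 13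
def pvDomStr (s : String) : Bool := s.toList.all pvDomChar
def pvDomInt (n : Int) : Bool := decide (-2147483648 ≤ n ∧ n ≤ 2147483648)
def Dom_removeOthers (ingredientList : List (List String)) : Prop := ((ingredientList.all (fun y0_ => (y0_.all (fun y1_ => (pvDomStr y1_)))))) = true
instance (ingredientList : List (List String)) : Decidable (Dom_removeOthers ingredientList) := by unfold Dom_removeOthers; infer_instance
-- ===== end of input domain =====

-- B replaces A's 39 guarded library-`.replace` passes by one set-membership filter pass
-- over the characters plus a hand-written cursor scan per phrase; alternative decomposition.

-- ===== PORT A =====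
def otherList_A : List String :=
  ["!", "\"", "#", "$", "%", "&", "'", "(", ")", "*", "+", ",", ".", ":", ";",
   "<", "=", ">", "?", "@", "[", "\\", "]", "^", "_", "`", "{", "|", "}", "~",
   " basic", " recipe follows", " see recipe", " refer to recipe", " as needed",
   " to taste", " optional", " garnish", " for serving"]

def removeOthers (ingredientList : List (List String)) : List String :=
  let remainderList := ingredientList.foldl
    (fun acc ingredient => acc ++ [PySem.Str.lower (PySem.Str.join " " ingredient)]) []
  remainderList.foldl
    (fun acc ingredient =>
      acc ++ [otherList_A.foldl
        (fun ing other => if PySem.Str.isIn other ing then PySem.Str.replace ing other "" else ing)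
        ingredient]) []

-- ===== PORT B =====
def punctSet_B : PySem.Set Char := PySem.Set.ofList "!\"#$%&'()*+,.:;<=>?@[\\]^_`{|}~".toList

def phrases_B : List String :=
  [" basic", " recipe follows", " see recipe", " refer to recipe", " as needed",
   " to taste", " optional", " garnish", " for serving"]

-- Source B's _strip: explicit cursor over the characters, skipping each occurrence of the
-- phrase; ported as suffix recursion (cursor i ↦ the remaining suffix). The empty-phrase
-- branch is unreachable (every phrase is nonempty; Python's while loop would not advance).
def stripChars_B (p : List Char) (l : List Char) : List Char :=
  match l with
  | [] => []
  | a :: t =>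
    match p with
    | [] => a :: t
    | _ :: ps =>
      if p.isPrefixOf (a :: t) then stripChars_B p (t.drop ps.length)
      else a :: stripChars_B p t
termination_by l.length
decreasing_by
  · simp only [List.length_cons, List.length_drop]; omega
  · simp

def stripStr_B (s : String) (phrase : String) : String :=
  String.ofList (stripChars_B phrase.toList s.toList)

def cleanOne_B (ingredient : List String) : String :=
  phrases_B.foldl stripStr_B
    (String.ofList
      ((PySem.Str.lower (PySem.Str.join " " ingredient)).toList.filter
        (fun ch => !(punctSet_B.contains ch))))

def removeOthers_alt (ingredientList : List (List String)) : List String :=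
  ingredientList.map cleanOne_B

-- ===== PRECONDITION & SPEC =====
def Spec_removeOthers (ingredientList : List (List String)) (out : List String) : Prop := out = removeOthers_alt ingredientList
instance (ingredientList : List (List String)) (out : List String) : Decidable (Spec_removeOthers ingredientList out) := by unfold Spec_removeOthers; infer_instance

-- ===== CLAIM (what is proved, stated in full; the proofs are below) =====
def Claim_equal_removeOthers : Prop := ∀ (ingredientList : List (List String)), Dom_removeOthers ingredientList → Spec_removeOthers ingredientList (removeOthers ingredientList)

-- ===== LEMMAS AND PROOFS =====

def punctChars : List Char := "!\"#$%&'()*+,.:;<=>?@[\\]^_`{|}~".toList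

-- replace.go with a single-character pattern and empty replacement is a filter
lemma go_single (c : Char) : ∀ (l acc : List Char) (fuel : Nat), l.length ≤ fuel →
    PySem.Chars.replace.go [c] [] fuel l acc
      = acc.reverse ++ l.filter (fun a => !(a == c)) := by
  intro l
  induction l with
  | nil =>
      intro acc fuel _
      cases fuel <;> simp [PySem.Chars.replace.go]
  | cons a t ih =>
      intro acc fuel hf
      cases fuel with
      | zero => simp at hf
      | succ f =>
        have hf' : t.length ≤ f := by simpa using hf
        by_cases h : c = a
        · subst h
          simp [PySem.Chars.replace.go, List.isPrefixOf, ih _ _ hf']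
        · have hba : (c == a) = false := by simp [h]
          simp [PySem.Chars.replace.go, List.isPrefixOf, hba, ih _ _ hf',
                Ne.symm h]

lemma replace_single (c : Char) (l : List Char) :
    PySem.Chars.replace l [c] [] = l.filter (fun a => !(a == c)) := by
  simpa [PySem.Chars.replace] using go_single c l [] l.length le_rfl

-- the guarded single-character step of A is a filter, guard or no guard
lemma stepA_char (c : Char) (s : String) :
    (if PySem.Str.isIn (String.ofList [c]) s
       then PySem.Str.replace s (String.ofList [c]) "" else s)
      = String.ofList (s.toList.filter (fun a => !(a == c))) := by
  by_cases h : PySem.Str.isIn (String.ofList [c]) s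
  · rw [if_pos h]
    simp [PySem.Str.replace, replace_single]
  · rw [if_neg h]
    have hnin : ¬ [c] <:+: s.toList := fun hc =>
      h ((PySem.Str.isIn_iff_infix (sub := String.ofList [c]) (s := s)).mpr (by simpa using hc))
    have hmem : c ∉ s.toList := by
      intro hm
      rcases List.mem_iff_append.mp hm with ⟨p, q, hpq⟩
      exact hnin ⟨p, q, by simp [hpq]⟩
    have hid : s.toList.filter (fun a => !(a == c)) = s.toList := by
      apply List.filter_eq_self.mpr
      intro a ha
      simp only [Bool.not_eq_eq_eq_not, Bool.not_true, beq_eq_false_iff_ne]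
      exact fun he => hmem (he ▸ ha)
    simp [hid]

-- folding A's guarded step over a list of single-character tokens = one filter pass
lemma fold_chars (cs : List Char) : ∀ (s : String),
    (cs.map (fun c => String.ofList [c])).foldl
        (fun ing other => if PySem.Str.isIn other ing then PySem.Str.replace ing other "" else ing) s
      = String.ofList (s.toList.filter (fun ch => !(cs.contains ch))) := by
  induction cs with
  | nil => intro s; simp
  | cons c cs ih =>
      intro s
      simp only [List.map_cons, List.foldl_cons, stepA_char, ih]
      congr 1
      simp only [String.toList_ofList, List.filter_filter]
      apply List.filter_congr
      intro a _
      by_cases hac : a = c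
      · subst hac; simp
      · simp [hac]

-- B's set is just the list of the 30 (distinct) punctuation characters
lemma punctSet_eq : punctSet_B = punctChars := by decide

lemma punctSet_contains (ch : Char) :
    punctSet_B.contains ch = punctChars.contains ch := by
  rw [punctSet_eq]; rfl

-- replace.go with empty replacement IS Source B's cursor scan
lemma go_strip (c : Char) (ps : List Char) :
    ∀ (fuel : Nat) (l acc : List Char), l.length ≤ fuel →
    PySem.Chars.replace.go (c :: ps) [] fuel l acc
      = acc.reverse ++ stripChars_B (c :: ps) l := by
  intro fuel
  induction fuel with
  | zero =>
      intro l acc hf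
      have : l = [] := List.eq_nil_of_length_eq_zero (Nat.le_zero.mp hf)
      subst this
      simp [PySem.Chars.replace.go, stripChars_B]
  | succ f ih =>
      intro l acc hf
      match l with
      | [] => simp [PySem.Chars.replace.go, stripChars_B]
      | a :: t =>
        have hf' : t.length ≤ f := by simpa using hf
        by_cases h : (c :: ps).isPrefixOf (a :: t)
        · have hd : (t.drop ps.length).length ≤ f := by
            simp only [List.length_drop]; omega
          simp [PySem.Chars.replace.go, h, stripChars_B, ih _ _ hd,
                List.drop_succ_cons]
        · simp [PySem.Chars.replace.go, h, stripChars_B, ih _ _ hf']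

-- the guarded phrase step of A equals B's _strip, guard or no guard
lemma stepA_phrase (s ph : String) (hp : ph.toList ≠ []) :
    (if PySem.Str.isIn ph s then PySem.Str.replace s ph "" else s)
      = stripStr_B s ph := by
  have hrepl : PySem.Str.replace s ph "" = stripStr_B s ph := by
    rcases hph : ph.toList with _ | ⟨c, ps⟩
    · exact absurd hph hp
    · unfold PySem.Str.replace stripStr_B
      rw [hph, show ("" : String).toList = [] from rfl]
      congr 1
      unfold PySem.Chars.replace
      rw [if_neg (by simp)]
      simpa using go_strip c ps s.toList.length s.toList [] le_rfl
  by_cases h : PySem.Str.isIn ph s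
  · rw [if_pos h, hrepl]
  · rw [if_neg h]
    have hnin : ¬ ph.toList <:+: s.toList := fun hc =>
      h ((PySem.Str.isIn_iff_infix (sub := ph) (s := s)).mpr hc)
    -- no occurrence: _strip copies every character, so s is unchanged either way
    rw [← hrepl]
    rcases hph : ph.toList with _ | ⟨c, ps⟩
    · exact absurd hph hp
    · have hgo : ∀ (l acc : List Char) (fuel : Nat), l.length ≤ fuel → ¬ (c :: ps) <:+: l →
          PySem.Chars.replace.go (c :: ps) [] fuel l acc = acc.reverse ++ l := by
        intro l
        induction l with
        | nil => intro acc fuel _ _; cases fuel <;> simp [PySem.Chars.replace.go]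
        | cons a t ihl =>
            intro acc fuel hfl hn
            cases fuel with
            | zero => simp at hfl
            | succ f =>
              have hpre : (c :: ps).isPrefixOf (a :: t) = false := by
                by_contra hcon
                exact hn ((List.isPrefixOf_iff_prefix.mp (by simpa using hcon)).isInfix)
              simp [PySem.Chars.replace.go, hpre,
                    ihl _ _ (by simpa using hfl) (fun hx => hn (List.infix_cons hx))]
      have hid : PySem.Chars.replace s.toList (c :: ps) ("" : String).toList = s.toList := by
        rw [show ("" : String).toList = [] from rfl]
        unfold PySem.Chars.replace
        rw [if_neg (by simp)]
        simpa using hgo s.toList [] s.toList.length le_rfl (hph ▸ hnin)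
      unfold PySem.Str.replace
      rw [hph, hid]
      simp

-- per-string equality of the two cleaning pipelines
lemma clean_eq (ingredient : List String) :
    otherList_A.foldl
        (fun ing other => if PySem.Str.isIn other ing then PySem.Str.replace ing other "" else ing)
        (PySem.Str.lower (PySem.Str.join " " ingredient))
      = cleanOne_B ingredient := by
  have hsplit : otherList_A
      = (punctChars.map (fun c => String.ofList [c])) ++ phrases_B := by rfl
  rw [hsplit, List.foldl_append, fold_chars]
  unfold cleanOne_B
  have hfilter :
      ((PySem.Str.lower (PySem.Str.join " " ingredient)).toList.filter
          (fun ch => !(punctChars.contains ch)))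
        = ((PySem.Str.lower (PySem.Str.join " " ingredient)).toList.filter
          (fun ch => !(punctSet_B.contains ch))) := by
    apply List.filter_congr
    intro a _
    rw [punctSet_contains]
  rw [hfilter]
  apply PySem.List.foldl_congr_mem
  intro t ph hm
  apply stepA_phrase
  fin_cases hm <;> simp

-- ===== VERDICT (by name: the statement is the Claim_ definition above) =====
theorem removeOthers_spec : Claim_equal_removeOthers := by
  intro ingredientList _
  unfold Spec_removeOthers removeOthers removeOthers_alt
  rw [PySem.List.foldl_append_singleton_eq_map, PySem.List.foldl_append_singleton_eq_map]
  simp only [List.nil_append, List.map_map]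
  apply List.map_congr_left
  intro ingredient _
  simpa only [Function.comp] using clean_eq ingredient
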